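-- pv_equiv track=rewrite | github.com/binsarjr/nggasak | scripts/extract_endpoints.py | combine_base_and_paths
-- ===== SOURCE A (Python) =====
-- from typing import Iterable, Iterator, List, Optional, Set, Tuple
--
-- def normalize_url(url: str) -> str:
--     # Drop trivial trailing punctuation
--     return url.rstrip("\"');, ]}")
--
-- def combine_base_and_paths(base_urls: Iterable[str], paths: Iterable[str]) -> Set[str]:
--     out: Set[str] = set()
--     for b in base_urls:
--         b_norm = normalize_url(b)
--         for p in paths:
--             if p.startswith("http://") or p.startswith("https://"):
--                 out.add(normalize_url(p))
--             else:
--                 # Combine smartly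
--                 if not b_norm.endswith("/") and not p.startswith("/"):
--                     out.add(b_norm + "/" + p)
--                 elif b_norm.endswith("/") and p.startswith("/"):
--                     out.add(b_norm + p.lstrip("/"))
--                 else:
--                     out.add(b_norm + p)
--     return out
-- ===== SOURCE B (Python) =====
-- from typing import Iterable, List, Set, Tuple
--
--
-- def normalize_url(url: str) -> str:
--     return url.rstrip("\"');, ]}")
--
--
-- def combine_base_and_paths(base_urls: Iterable[str], paths: Iterable[str]) -> Set[str]:
--     # Stage 1: one pass over paths builds TWO precomputed suffix tables — one for
--     # bases that end with '/', one for bases that do not — resolving all slash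
--     # logic and absolute-URL normalization up front.
--     table_slash: List[Tuple[bool, str]] = []    # entries (is_absolute, suffix)
--     table_noslash: List[Tuple[bool, str]] = []
--     for p in paths:
--         if p.startswith("http://") or p.startswith("https://"):
--             a = normalize_url(p)
--             table_slash.append((True, a))
--             table_noslash.append((True, a))
--         elif p.startswith("/"):
--             table_slash.append((False, p.lstrip("/")))
--             table_noslash.append((False, p))
--         else:
--             table_slash.append((False, p))
--             table_noslash.append((False, "/" + p))
--     # Stage 2: each base just selects its table by shape and emits branch-free
--     # concatenations; no per-(base,path) classification remains.
--     out: Set[str] = set()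
--     for b in base_urls:
--         bn = normalize_url(b)
--         table = table_slash if bn.endswith("/") else table_noslash
--         for is_abs, s in table:
--             out.add(s if is_abs else bn + s)
--     return out
-- ===== Notes on version B (the rewrite author's own statement) =====
-- stated objective: alternative
-- what changed: B is a two-stage algorithm: one pass over the paths precomputes two suffix tables (one for bases ending in '/', one for bases that do not), resolving all slash-joining and absolute-URL normalization up front; each base then merely selects its table by shape and emits plain concatenations, so the per-(base,path) branching of A's nested loops disappears.
import Mathlib
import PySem

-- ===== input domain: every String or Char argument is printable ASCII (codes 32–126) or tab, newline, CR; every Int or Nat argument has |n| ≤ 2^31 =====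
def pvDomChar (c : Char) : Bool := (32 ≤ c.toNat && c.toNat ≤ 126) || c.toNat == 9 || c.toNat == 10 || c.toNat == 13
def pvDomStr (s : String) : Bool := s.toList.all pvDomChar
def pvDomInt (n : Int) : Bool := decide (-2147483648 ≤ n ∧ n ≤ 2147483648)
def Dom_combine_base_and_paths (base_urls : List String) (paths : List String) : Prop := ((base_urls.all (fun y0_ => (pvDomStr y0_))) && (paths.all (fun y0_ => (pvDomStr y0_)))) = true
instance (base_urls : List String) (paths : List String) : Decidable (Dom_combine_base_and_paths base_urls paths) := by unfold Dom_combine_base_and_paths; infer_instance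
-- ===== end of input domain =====

-- B replaces A's nested classify-and-join loops by a staged algorithm: one pass over paths precomputes two suffix tables (slash-base / non-slash-base); each base selects its table and emits plain concatenations.

-- shared helper: url.rstrip("\"');, ]}")  (hand port of str.rstrip(chars), exact: drop trailing chars in the set)
def pyRstripChars (s : String) (chars : String) : String :=
  String.ofList ((s.toList.reverse.dropWhile (fun c => chars.toList.contains c)).reverse)

-- hand port of p.lstrip("/"), exact: drop leading chars in the set
def pyLstripChars (s : String) (chars : String) : String :=
  String.ofList (s.toList.dropWhile (fun c => chars.toList.contains c))

def normalize_url (url : String) : String := pyRstripChars url "\"');, ]}"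

-- ===== PORT A =====
def combine_base_and_paths (base_urls : List String) (paths : List String) : List String :=
  base_urls.foldl (fun out b =>
    let b_norm := normalize_url b
    paths.foldl (fun out p =>
      if PySem.Str.startswith p "http://" || PySem.Str.startswith p "https://" then
        PySem.Set.add out (normalize_url p)
      else if !(PySem.Str.endswith b_norm "/") && !(PySem.Str.startswith p "/") then
        PySem.Set.add out (b_norm ++ "/" ++ p)
      else if PySem.Str.endswith b_norm "/" && PySem.Str.startswith p "/" then
        PySem.Set.add out (b_norm ++ pyLstripChars p "/")
      else
        PySem.Set.add out (b_norm ++ p)) out) PySem.Set.empty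

-- ===== PORT B =====
-- stage 1 of Source B: single pass over paths building both suffix tables
def mkTables : List String → List (Bool × String) × List (Bool × String)
  | [] => ([], [])
  | p :: ps =>
    let t := mkTables ps
    if PySem.Str.startswith p "http://" || PySem.Str.startswith p "https://" then
      ((true, normalize_url p) :: t.1, (true, normalize_url p) :: t.2)
    else if PySem.Str.startswith p "/" then
      ((false, pyLstripChars p "/") :: t.1, (false, p) :: t.2)
    else
      ((false, p) :: t.1, (false, "/" ++ p) :: t.2)

def combine_base_and_paths_alt (base_urls : List String) (paths : List String) : List String :=
  let tables := mkTables paths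
  base_urls.foldl (fun out b =>
    let bn := normalize_url b
    let table := if PySem.Str.endswith bn "/" then tables.1 else tables.2
    table.foldl (fun out t => PySem.Set.add out (if t.1 then t.2 else bn ++ t.2)) out)
    PySem.Set.empty

-- ===== PRECONDITION & SPEC =====
def Spec_combine_base_and_paths (base_urls : List String) (paths : List String) (out : List String) : Prop := out = combine_base_and_paths_alt base_urls paths
instance (base_urls : List String) (paths : List String) (out : List String) : Decidable (Spec_combine_base_and_paths base_urls paths out) := by unfold Spec_combine_base_and_paths; infer_instance

-- ===== CLAIM =====
def Claim_equal_combine_base_and_paths : Prop := ∀ (base_urls : List String) (paths : List String), Dom_combine_base_and_paths base_urls paths → Spec_combine_base_and_paths base_urls paths (combine_base_and_paths base_urls paths)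

-- ===== LEMMAS AND PROOFS =====

-- the entry stage 1 produces for path p in the slash-base table
def fS (p : String) : Bool × String :=
  if PySem.Str.startswith p "http://" || PySem.Str.startswith p "https://" then
    (true, normalize_url p)
  else if PySem.Str.startswith p "/" then (false, pyLstripChars p "/")
  else (false, p)

-- the entry stage 1 produces for path p in the non-slash-base table
def fN (p : String) : Bool × String :=
  if PySem.Str.startswith p "http://" || PySem.Str.startswith p "https://" then
    (true, normalize_url p)
  else if PySem.Str.startswith p "/" then (false, p)
  else (false, "/" ++ p)

theorem mkTables_eq (ps : List String) : mkTables ps = (ps.map fS, ps.map fN) := by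
  induction ps with
  | nil => rfl
  | cons p ps ih =>
      simp only [mkTables, ih, List.map_cons, fS, fN]
      split_ifs <;> rfl

theorem inner_eq (bn : String) (ps : List String) (out : List String) :
    ps.foldl (fun out p =>
      if PySem.Str.startswith p "http://" || PySem.Str.startswith p "https://" then
        PySem.Set.add out (normalize_url p)
      else if !(PySem.Str.endswith bn "/") && !(PySem.Str.startswith p "/") then
        PySem.Set.add out (bn ++ "/" ++ p)
      else if PySem.Str.endswith bn "/" && PySem.Str.startswith p "/" then
        PySem.Set.add out (bn ++ pyLstripChars p "/")
      else
        PySem.Set.add out (bn ++ p)) out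
    = (if PySem.Str.endswith bn "/" then ps.map fS else ps.map fN).foldl
        (fun out t => PySem.Set.add out (if t.1 then t.2 else bn ++ t.2)) out := by
  by_cases hs : PySem.Str.endswith bn "/" = true
  · rw [if_pos hs, List.foldl_map]
    congr 1
    funext out p
    simp only [fS, hs]
    split_ifs <;> simp_all [String.append_assoc]
  · rw [if_neg hs, List.foldl_map]
    congr 1
    funext out p
    simp only [fN, Bool.not_eq_true] at *
    simp only [hs]
    split_ifs <;> simp_all [String.append_assoc]

theorem combine_base_and_paths_spec : Claim_equal_combine_base_and_paths := by
  intro bs ps _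
  unfold Spec_combine_base_and_paths combine_base_and_paths combine_base_and_paths_alt
  rw [mkTables_eq]
  congr 1
  funext out b
  exact inner_eq (normalize_url b) ps out
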